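-- pv_equiv track=rewrite | github.com/elakya04/AZAC-July-Editorial | equalize.py | solution
-- ===== SOURCE A (Python) =====
-- def solution(A, B):
--     # Write your code here
--     n = len(A)  # Get the size of the arrays
--     incr, decr, ops = 0, 0, 0  # Initialize variables to track increments, decrements, and operations
--
--     # Iterate through each element of the arrays
--     for i in range(n):
--         diff = B[i] - A[i]  # Calculate the difference between corresponding elements of B and A
--
--         if diff > 0:  # If the difference is positive (B[i] > A[i])
--             if incr < diff:
--                 ops += diff - incr  # Increment operations if the required increment is more than the current
--             incr = diff  # Update the increment value
--             decr = 0  # Reset decrement value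
--         elif diff < 0:  # If the difference is negative (B[i] < A[i])
--             if diff < decr:
--                 ops += decr - diff  # Increment operations if the required decrement is more than the current
--             decr = diff  # Update the decrement value
--             incr = 0  # Reset increment value
--         else:
--             incr = decr = 0  # Reset both increment and decrement if A[i] == B[i]
--
--     return ops  # Return the total number of operations
-- ===== SOURCE B (Python) =====
-- def solution(A, B):
--     # Simpler decomposition: precompute the diff list, clamp it into a
--     # non-negative "up" sequence and a non-negative "down" sequence, and
--     # return the total upward variation of each against a 0 baseline.
--     diffs = [b - a for a, b in zip(A, B)]
--
--     def upvar(xs):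
--         total, prev = 0, 0
--         for x in xs:
--             total += max(0, x - prev)
--             prev = x
--         return total
--
--     return upvar([max(0, d) for d in diffs]) + upvar([max(0, -d) for d in diffs])
-- ===== Notes on version B (the rewrite author's own statement) =====
-- stated objective: simpler
-- what changed: Replaces A's single interleaved incr/decr state machine with a precomputed diff list, two clamped sequences (positive and negated-negative parts) and two independent upward-variation reductions.
import Mathlib
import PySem

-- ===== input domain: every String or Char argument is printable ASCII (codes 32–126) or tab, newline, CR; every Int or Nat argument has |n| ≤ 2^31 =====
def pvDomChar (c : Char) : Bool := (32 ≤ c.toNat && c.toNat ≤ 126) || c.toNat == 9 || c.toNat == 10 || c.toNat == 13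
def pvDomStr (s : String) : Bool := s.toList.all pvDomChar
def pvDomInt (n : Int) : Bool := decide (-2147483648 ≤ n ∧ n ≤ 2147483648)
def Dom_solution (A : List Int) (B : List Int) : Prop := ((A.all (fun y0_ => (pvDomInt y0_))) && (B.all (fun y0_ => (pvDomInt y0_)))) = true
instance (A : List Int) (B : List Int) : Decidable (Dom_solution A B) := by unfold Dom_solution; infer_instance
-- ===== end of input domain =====

-- B replaces A's interleaved incr/decr state machine by a diff list, two clamped
-- sequences and two independent upward-variation sums (objective: simpler decomposition).

-- ===== PORT A =====
-- step of A's for-loop over i in range(n); state = (incr, decr, ops)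
def solStep (s : Int × Int × Int) (diff : Int) : Int × Int × Int :=
  if diff > 0 then
    (diff, 0, s.2.2 + (if s.1 < diff then diff - s.1 else 0))
  else if diff < 0 then
    (0, diff, s.2.2 + (if diff < s.2.1 then s.2.1 - diff else 0))
  else
    (0, 0, s.2.2)

def solution (A : List Int) (B : List Int) : Int :=
  ((PySem.List.pyRange 0 (A.length : Int) 1).foldl
    (fun s i => solStep s (PySem.List.pyGetD B i 0 - PySem.List.pyGetD A i 0))
    (0, 0, 0)).2.2

-- ===== PORT B =====
-- total upward variation against a 0 baseline; state = (total, prev)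
def upvar (xs : List Int) : Int :=
  (xs.foldl (fun (s : Int × Int) x => (s.1 + max 0 (x - s.2), x)) (0, 0)).1

def solution_alt (A : List Int) (B : List Int) : Int :=
  let diffs := List.zipWith (fun a b => b - a) A B
  upvar (diffs.map (fun d => max 0 d)) + upvar (diffs.map (fun d => max 0 (-d)))

-- ===== PRECONDITION & SPEC =====
-- A raises IndexError on B[i] exactly when len(B) < len(A); those inputs are excluded.
def Pre_solution (A : List Int) (B : List Int) : Prop := A.length ≤ B.length
instance (A : List Int) (B : List Int) : Decidable (Pre_solution A B) := by unfold Pre_solution; infer_instance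
def pvWitness_solution : List Int × List Int := ([1, 5, 2], [3, 1, 2])

def Spec_solution (A : List Int) (B : List Int) (out : Int) : Prop := out = solution_alt A B
instance (A : List Int) (B : List Int) (out : Int) : Decidable (Spec_solution A B out) := by unfold Spec_solution; infer_instance

-- ===== CLAIM (what is proved, stated in full; the proofs are below) =====
def Claim_equal_solution : Prop := ∀ (A : List Int) (B : List Int), Dom_solution A B → Pre_solution A B → Spec_solution A B (solution A B)

-- ===== LEMMAS AND PROOFS =====

-- A's fold over indices is its fold over the zipped diff list.
theorem solution_eq_foldl (A B : List Int) (h : A.length ≤ B.length) :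
    solution A B =
      ((List.zipWith (fun a b => b - a) A B).foldl solStep (0, 0, 0)).2.2 := by
  unfold solution
  have hlen : (List.zipWith (fun a b => b - a) A B).length = A.length := by
    simp [List.length_zipWith]; omega
  rw [show (A.length : Int) = ((List.zipWith (fun a b => b - a) A B).length : Int) by
        rw [hlen]]
  rw [PySem.List.foldl_congr_mem _ _
        (fun s i => solStep s (PySem.List.pyGetD (List.zipWith (fun a b => b - a) A B) i 0))
        (0, 0, 0)
        (by
          intro acc x hx
          rw [PySem.List.mem_pyRange_one] at hx
          have h1 : x < ((List.zipWith (fun a b => b - a) A B).length : Int) := hx.2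
          have h0 : (0 : Int) ≤ x := hx.1
          simp only [PySem.List.pyGetD_eq_getElem (List.zipWith (fun a b => b - a) A B) 0 h0 h1,
                     PySem.List.pyGetD_eq_getElem A 0 h0 (by omega : x < (A.length : Int)),
                     PySem.List.pyGetD_eq_getElem B 0 h0 (by omega : x < (B.length : Int)),
                     List.getElem_zipWith])]
  rw [PySem.List.foldl_pyRange_zero_pyGetD' (List.zipWith (fun a b => b - a) A B) 0 solStep (0, 0, 0)]

-- The combined invariant: A's state machine vs the two clamped running sums.
theorem main_inv (ds : List Int) : ∀ (p t1 t2 ops : Int),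
    (ds.foldl solStep (max 0 p, min 0 p, ops)).2.2
      = ops
        + ((ds.map (fun d => max 0 d)).foldl
            (fun (s : Int × Int) x => (s.1 + max 0 (x - s.2), x)) (t1, max 0 p)).1 - t1
        + ((ds.map (fun d => max 0 (-d))).foldl
            (fun (s : Int × Int) x => (s.1 + max 0 (x - s.2), x)) (t2, max 0 (-p))).1 - t2 := by
  induction ds with
  | nil => intro p t1 t2 ops; simp
  | cons d ds ih =>
    intro p t1 t2 ops
    have hstep : solStep (max 0 p, min 0 p, ops) d
        = (max 0 d, min 0 d,
            ops + max 0 (max 0 d - max 0 p) + max 0 (max 0 (-d) - max 0 (-p))) := by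
      unfold solStep
      split_ifs with h1 h2 h3 h4 <;> simp_all <;> omega
    simp only [List.foldl_cons, List.map_cons, hstep]
    rw [ih d (t1 + max 0 (max 0 d - max 0 p)) (t2 + max 0 (max 0 (-d) - max 0 (-p)))]
    omega

-- ===== VERDICT (by name: the statement is the Claim_ definition above) =====
theorem solution_spec : Claim_equal_solution := by
  intro A B _ hpre
  unfold Spec_solution solution_alt upvar
  rw [solution_eq_foldl A B hpre]
  have := main_inv (List.zipWith (fun a b => b - a) A B) 0 0 0 0
  simpa using this
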